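-- pv_equiv track=rewrite | github.com/provide-io/wrknv | mutants/src/wrknv/wenv/operations/verify.py | x_parse_terraform_version__mutmut_38
-- ===== SOURCE A (Python) =====
-- def x_parse_terraform_version__mutmut_38(output: str) -> dict[str, str]:
--     """Parse Terraform version output."""
--
--     # Example: "Terraform v1.5.0"
--     lines = output.split("\n")
--
--     info = {"tool": "terraform"}
--
--     for line in lines:
--         line = line.strip()
--         if line.startswith("Terraform v"):
--             version = line.replace("Terraform v", "")
--             info["version"] = version
--         elif line.startswith("on "):
--             # Extract platform from "on linux_amd64" format
--             info["platform"] = line.replace("on ", "XXXX").strip()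
--
--     return info
-- ===== SOURCE B (Python) =====
-- def x_parse_terraform_version__mutmut_38(output: str) -> dict[str, str]:
--     """Parse Terraform version output."""
--     lines = [l.strip() for l in output.split("\n")]
--     versions = [l.replace("Terraform v", "") for l in lines if l.startswith("Terraform v")]
--     platforms = [l.replace("on ", "XXXX").strip() for l in lines if l.startswith("on ")]
--     info = {"tool": "terraform"}
--     if versions:
--         info["version"] = versions[-1]
--     if platforms:
--         info["platform"] = platforms[-1]
--     return info
-- ===== Notes on version B (the rewrite author's own statement) =====
-- stated objective: alternative
-- what changed: Replaced A's stateful dict-updating loop by independent comprehension passes (last match of each kind wins) that build the dict in a fixed key order; Pre_ excludes outputs where an 'on ' line precedes every 'Terraform v' line while both kinds occur, on which A's key insertion order (platform before version) is an accident of dict insertion.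
import Mathlib
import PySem

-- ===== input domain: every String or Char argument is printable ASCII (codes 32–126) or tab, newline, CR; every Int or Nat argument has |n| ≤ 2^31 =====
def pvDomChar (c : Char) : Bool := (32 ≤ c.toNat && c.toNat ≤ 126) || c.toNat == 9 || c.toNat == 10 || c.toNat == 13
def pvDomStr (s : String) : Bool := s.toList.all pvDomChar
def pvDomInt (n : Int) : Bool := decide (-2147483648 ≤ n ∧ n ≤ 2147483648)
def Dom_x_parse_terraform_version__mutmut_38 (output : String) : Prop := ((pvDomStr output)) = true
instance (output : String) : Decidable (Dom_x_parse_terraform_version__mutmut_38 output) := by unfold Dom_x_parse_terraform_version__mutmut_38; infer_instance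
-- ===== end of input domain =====

-- B replaces A's stateful dict-updating loop by independent comprehension passes whose
-- dict is built in a fixed key order; objective: alternative decomposition, same cost.

-- ===== PORT A =====
def x_parse_terraform_version__mutmut_38 (output : String) : List (String × String) :=
  -- split? is exact for the non-empty separator "\n" (always some); getD [] is unreachable
  let lines := (PySem.Str.split? output "\n").getD []
  let info : PySem.Dict String String := PySem.Dict.ofList [("tool", "terraform")]
  (lines.foldl (fun info line =>
    let line := PySem.Str.strip line
    if PySem.Str.startswith line "Terraform v" then
      info.insert "version" (PySem.Str.replace line "Terraform v" "")
    else if PySem.Str.startswith line "on " then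
      info.insert "platform" (PySem.Str.strip (PySem.Str.replace line "on " "XXXX"))
    else info) info).items

-- ===== PORT B =====
def x_parse_terraform_version__mutmut_38_alt (output : String) : List (String × String) :=
  -- split? is exact for the non-empty separator "\n" (always some); getD [] is unreachable
  let lines := ((PySem.Str.split? output "\n").getD []).map PySem.Str.strip
  let versions := (lines.filter (fun l => PySem.Str.startswith l "Terraform v")).map
      (fun l => PySem.Str.replace l "Terraform v" "")
  let platforms := (lines.filter (fun l => PySem.Str.startswith l "on ")).map
      (fun l => PySem.Str.strip (PySem.Str.replace l "on " "XXXX"))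
  let info : PySem.Dict String String := PySem.Dict.ofList [("tool", "terraform")]
  let info := match versions.getLast? with
    | some v => info.insert "version" v
    | none => info
  let info := match platforms.getLast? with
    | some p => info.insert "platform" p
    | none => info
  info.items

-- ===== PRECONDITION & SPEC =====
def pvVb (l : String) : Bool := PySem.Str.startswith l "Terraform v"
def pvPb (l : String) : Bool := PySem.Str.startswith l "on "
def pvLines (output : String) : List String :=
  ((PySem.Str.split? output "\n").getD []).map PySem.Str.strip

-- Pre_ excludes outputs where an "on " line precedes every "Terraform v" line while both kinds
-- occur: there A's dict key order (platform before version) is an accident of insertion order,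
-- and either key order is defensible; the key-value pairs themselves still agree.
def Pre_x_parse_terraform_version__mutmut_38 (output : String) : Prop :=
  ¬(((pvLines output).any pvVb) = true ∧
    (match (pvLines output).find? (fun l => pvVb l || pvPb l) with
     | some l => pvPb l
     | none => false) = true)
instance (output : String) : Decidable (Pre_x_parse_terraform_version__mutmut_38 output) := by
  unfold Pre_x_parse_terraform_version__mutmut_38; infer_instance

def pvWitness_x_parse_terraform_version__mutmut_38 : String := "Terraform v1.5.0\non linux_amd64"

def Spec_x_parse_terraform_version__mutmut_38 (output : String) (out : List (String × String)) : Prop := out = x_parse_terraform_version__mutmut_38_alt output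
instance (output : String) (out : List (String × String)) : Decidable (Spec_x_parse_terraform_version__mutmut_38 output out) := by unfold Spec_x_parse_terraform_version__mutmut_38; infer_instance

-- ===== CLAIM (what is proved, stated in full; the proofs are below) =====
def Claim_equal_x_parse_terraform_version__mutmut_38 : Prop := ∀ (output : String), Dom_x_parse_terraform_version__mutmut_38 output → Pre_x_parse_terraform_version__mutmut_38 output → Spec_x_parse_terraform_version__mutmut_38 output (x_parse_terraform_version__mutmut_38 output)

-- ===== LEMMAS AND PROOFS =====

def pvVval (l : String) : String := PySem.Str.replace l "Terraform v" ""
def pvPval (l : String) : String := PySem.Str.strip (PySem.Str.replace l "on " "XXXX")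

-- a line cannot start with both "Terraform v" and "on "
theorem pvVb_not_pvPb (l : String) (h : pvVb l = true) : pvPb l = false := by
  unfold pvVb pvPb at *
  simp only [PySem.Str.startswith_eq] at h ⊢
  rw [PySem.Chars.startswith_iff] at h
  obtain ⟨t, ht⟩ := h
  rw [Bool.eq_false_iff]
  intro hc
  rw [PySem.Chars.startswith_iff] at hc
  obtain ⟨u, hu⟩ := hc
  rw [← ht] at hu
  simp at hu

-- the normal-form dict: tool entry plus optional version/platform entries, Bool = version first
def pvMkd : Option String → Option String → Bool → PySem.Dict String String
  | none, none, _ => PySem.Dict.mk [("tool", "terraform")]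
  | some v, none, _ => PySem.Dict.mk [("tool", "terraform"), ("version", v)]
  | none, some p, _ => PySem.Dict.mk [("tool", "terraform"), ("platform", p)]
  | some v, some p, true => PySem.Dict.mk [("tool", "terraform"), ("version", v), ("platform", p)]
  | some v, some p, false => PySem.Dict.mk [("tool", "terraform"), ("platform", p), ("version", v)]

def pvSv (ls : List String) : Option String := ((ls.filter pvVb).map pvVval).getLast?
def pvSp (ls : List String) : Option String := ((ls.filter pvPb).map pvPval).getLast?
def pvSf (ls : List String) : Bool :=
  match ls.find? (fun l => pvVb l || pvPb l) with
  | some l => pvVb l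
  | none => true

def pvStep (d : PySem.Dict String String) (l : String) : PySem.Dict String String :=
  if pvVb l then d.insert "version" (pvVval l)
  else if pvPb l then d.insert "platform" (pvPval l)
  else d

theorem pvSv_none_iff (ls : List String) : pvSv ls = none ↔ ls.filter pvVb = [] := by
  unfold pvSv
  rw [List.getLast?_eq_none_iff, List.map_eq_nil_iff]

theorem pvSp_none_iff (ls : List String) : pvSp ls = none ↔ ls.filter pvPb = [] := by
  unfold pvSp
  rw [List.getLast?_eq_none_iff, List.map_eq_nil_iff]

theorem pvNone_of_find_none (ls : List String)
    (hfind : ls.find? (fun l => pvVb l || pvPb l) = none) :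
    pvSv ls = none ∧ pvSp ls = none := by
  rw [List.find?_eq_none] at hfind
  constructor
  · rw [pvSv_none_iff, List.filter_eq_nil_iff]
    intro a ha
    have := hfind a ha
    simp at this
    exact fun hc => absurd this.1 (by simp [hc])
  · rw [pvSp_none_iff, List.filter_eq_nil_iff]
    intro a ha
    have := hfind a ha
    simp at this
    exact fun hc => absurd this.2 (by simp [hc])

theorem pvSf_false (ls : List String) (hv : pvSv ls = none) (hp : pvSp ls ≠ none) :
    pvSf ls = false := by
  unfold pvSf
  cases hfind : ls.find? (fun l => pvVb l || pvPb l) with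
  | none => exact absurd (pvNone_of_find_none ls hfind).2 hp
  | some x =>
    have hx := List.find?_some hfind
    have hmem := List.mem_of_find?_eq_some hfind
    rw [pvSv_none_iff, List.filter_eq_nil_iff] at hv
    simpa using hv x hmem

theorem pvSf_true (ls : List String) (hp : pvSp ls = none) :
    pvSf ls = true := by
  unfold pvSf
  cases hfind : ls.find? (fun l => pvVb l || pvPb l) with
  | none => rfl
  | some x =>
    have hx := List.find?_some hfind
    have hmem := List.mem_of_find?_eq_some hfind
    rw [pvSp_none_iff, List.filter_eq_nil_iff] at hp
    have := hp x hmem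
    simp only [Bool.or_eq_true] at hx
    rcases hx with h | h
    · exact h
    · exact absurd h this

theorem pvSv_append_V (ls : List String) (l : String) (hV : pvVb l = true) :
    pvSv (ls ++ [l]) = some (pvVval l) := by
  unfold pvSv
  rw [List.filter_append, List.map_append]
  simp [hV]

theorem pvSv_append_nV (ls : List String) (l : String) (hV : pvVb l = false) :
    pvSv (ls ++ [l]) = pvSv ls := by
  unfold pvSv
  rw [List.filter_append]
  simp [hV]

theorem pvSp_append_P (ls : List String) (l : String) (hP : pvPb l = true) :
    pvSp (ls ++ [l]) = some (pvPval l) := by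
  unfold pvSp
  rw [List.filter_append, List.map_append]
  simp [hP]

theorem pvSp_append_nP (ls : List String) (l : String) (hP : pvPb l = false) :
    pvSp (ls ++ [l]) = pvSp ls := by
  unfold pvSp
  rw [List.filter_append]
  simp [hP]

theorem pvStepLemma (ls : List String) (l : String) :
    pvStep (pvMkd (pvSv ls) (pvSp ls) (pvSf ls)) l
      = pvMkd (pvSv (ls ++ [l])) (pvSp (ls ++ [l])) (pvSf (ls ++ [l])) := by
  cases hV : pvVb l with
  | true =>
    have hP := pvVb_not_pvPb l hV
    rw [pvSv_append_V ls l hV, pvSp_append_nP ls l hP]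
    cases hfind : ls.find? (fun l => pvVb l || pvPb l) with
    | none =>
      obtain ⟨hsv, hsp⟩ := pvNone_of_find_none ls hfind
      have hsf' : pvSf (ls ++ [l]) = true := by
        simp [pvSf, List.find?_append, hfind, hV]
      rw [hsv, hsp, hsf']
      apply PySem.Dict.ext
      simp only [pvStep, hV, if_true, pvMkd]
      rw [PySem.Dict.items_insert_of_not_contains] <;> simp
    | some x =>
      have hsf' : pvSf (ls ++ [l]) = pvSf ls := by
        simp [pvSf, List.find?_append, hfind]
      rw [hsf']
      have hpredx := List.find?_some hfind
      have hmemx := List.mem_of_find?_eq_some hfind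
      cases hsv : pvSv ls with
      | none =>
        cases hsp : pvSp ls with
        | none =>
          rw [pvSv_none_iff, List.filter_eq_nil_iff] at hsv
          rw [pvSp_none_iff, List.filter_eq_nil_iff] at hsp
          have h1 := hsv x hmemx
          have h2 := hsp x hmemx
          simp only [Bool.or_eq_true] at hpredx
          rcases hpredx with h | h
          · exact absurd h h1
          · exact absurd h h2
        | some p =>
          have hf : pvSf ls = false := pvSf_false ls hsv (by rw [hsp]; simp)
          rw [hf]
          apply PySem.Dict.ext
          simp only [pvStep, hV, if_true, pvMkd]
          rw [PySem.Dict.items_insert_of_not_contains] <;> simp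
      | some v0 =>
        cases hsp : pvSp ls with
        | none =>
          have hf : pvSf ls = true := pvSf_true ls hsp
          rw [hf]
          apply PySem.Dict.ext
          simp only [pvStep, hV, if_true, pvMkd]
          rw [PySem.Dict.items_insert_of_contains] <;> simp
        | some p =>
          cases hf : pvSf ls with
          | true =>
            apply PySem.Dict.ext
            simp only [pvStep, hV, if_true, pvMkd]
            rw [PySem.Dict.items_insert_of_contains] <;> simp
          | false =>
            apply PySem.Dict.ext
            simp only [pvStep, hV, if_true, pvMkd]
            rw [PySem.Dict.items_insert_of_contains] <;> simp
  | false =>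
    cases hP : pvPb l with
    | true =>
      rw [pvSv_append_nV ls l hV, pvSp_append_P ls l hP]
      cases hfind : ls.find? (fun l => pvVb l || pvPb l) with
      | none =>
        obtain ⟨hsv, hsp⟩ := pvNone_of_find_none ls hfind
        have hsf' : pvSf (ls ++ [l]) = false := by
          simp [pvSf, List.find?_append, hfind, hP, hV]
        rw [hsv, hsp, hsf']
        apply PySem.Dict.ext
        simp only [pvStep, hV, hP, if_true, if_false, Bool.false_eq_true, pvMkd]
        rw [PySem.Dict.items_insert_of_not_contains] <;> simp
      | some x =>
        have hsf' : pvSf (ls ++ [l]) = pvSf ls := by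
          simp [pvSf, List.find?_append, hfind]
        rw [hsf']
        have hpredx := List.find?_some hfind
        have hmemx := List.mem_of_find?_eq_some hfind
        cases hsv : pvSv ls with
        | none =>
          cases hsp : pvSp ls with
          | none =>
            rw [pvSv_none_iff, List.filter_eq_nil_iff] at hsv
            rw [pvSp_none_iff, List.filter_eq_nil_iff] at hsp
            have h1 := hsv x hmemx
            have h2 := hsp x hmemx
            simp only [Bool.or_eq_true] at hpredx
            rcases hpredx with h | h
            · exact absurd h h1
            · exact absurd h h2
          | some p =>
            have hf : pvSf ls = false := pvSf_false ls hsv (by rw [hsp]; simp)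
            rw [hf]
            apply PySem.Dict.ext
            simp only [pvStep, hV, hP, if_true, if_false, Bool.false_eq_true, pvMkd]
            rw [PySem.Dict.items_insert_of_contains] <;> simp
        | some v0 =>
          cases hsp : pvSp ls with
          | none =>
            have hf : pvSf ls = true := pvSf_true ls hsp
            rw [hf]
            apply PySem.Dict.ext
            simp only [pvStep, hV, hP, if_true, if_false, Bool.false_eq_true, pvMkd]
            rw [PySem.Dict.items_insert_of_not_contains] <;> simp
          | some p =>
            cases hf : pvSf ls with
            | true =>
              apply PySem.Dict.ext
              simp only [pvStep, hV, hP, if_true, if_false, Bool.false_eq_true, pvMkd]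
              rw [PySem.Dict.items_insert_of_contains] <;> simp
            | false =>
              apply PySem.Dict.ext
              simp only [pvStep, hV, hP, if_true, if_false, Bool.false_eq_true, pvMkd]
              rw [PySem.Dict.items_insert_of_contains] <;> simp
    | false =>
      rw [pvSv_append_nV ls l hV, pvSp_append_nP ls l hP]
      have hsf' : pvSf (ls ++ [l]) = pvSf ls := by
        cases hfind : ls.find? (fun l => pvVb l || pvPb l) with
        | none => simp [pvSf, List.find?_append, hfind, hV, hP]
        | some x => simp [pvSf, List.find?_append, hfind]
      rw [hsf', pvStep, hV, hP]
      simp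

theorem pvMain (ls : List String) :
    ls.foldl pvStep (pvMkd none none true) = pvMkd (pvSv ls) (pvSp ls) (pvSf ls) := by
  induction ls using List.reverseRecOn with
  | nil => rfl
  | append_singleton ls l ih =>
    rw [List.foldl_append, List.foldl_cons, List.foldl_nil, ih, pvStepLemma]

theorem pvOfList_eq : (PySem.Dict.ofList [("tool", "terraform")] : PySem.Dict String String)
    = pvMkd none none true := by decide

-- B's fixed-order build, as a function of the two optional values
def pvAltBuild (o1 o2 : Option String) : List (String × String) :=
  let info : PySem.Dict String String := PySem.Dict.ofList [("tool", "terraform")]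
  let info := match o1 with
    | some v => info.insert "version" v
    | none => info
  let info := match o2 with
    | some p => info.insert "platform" p
    | none => info
  info.items

theorem pvAltEq (o1 o2 : Option String) : (pvMkd o1 o2 true).items = pvAltBuild o1 o2 := by
  cases o1 <;> cases o2 <;>
    simp [pvMkd, pvAltBuild, pvOfList_eq, PySem.Dict.items_insert, PySem.Dict.contains_insert]

-- under Pre_, if a version line exists the first marker line is a version line
theorem pvSf_of_pre (output : String)
    (hpre : Pre_x_parse_terraform_version__mutmut_38 output)
    (hv : pvSv (pvLines output) ≠ none) : pvSf (pvLines output) = true := by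
  unfold Pre_x_parse_terraform_version__mutmut_38 at hpre
  have hfil : (pvLines output).filter pvVb ≠ [] :=
    fun hc => hv ((pvSv_none_iff _).mpr hc)
  have hany : (pvLines output).any pvVb = true := by
    obtain ⟨x, hx⟩ := List.exists_mem_of_ne_nil _ hfil
    exact List.any_eq_true.mpr ⟨x, List.mem_of_mem_filter hx, List.of_mem_filter hx⟩
  unfold pvSf
  cases hfind : (pvLines output).find? (fun l => pvVb l || pvPb l) with
  | none => rfl
  | some l =>
    have hpred := List.find?_some hfind
    by_contra hvl
    have hpl : pvPb l = true := by
      simp only [Bool.or_eq_true] at hpred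
      rcases hpred with h | h
      · exact absurd h hvl
      · exact h
    exact hpre ⟨hany, by rw [hfind]; exact hpl⟩

theorem x_parse_terraform_version__mutmut_38_spec' (output : String)
    (hpre : Pre_x_parse_terraform_version__mutmut_38 output) :
    x_parse_terraform_version__mutmut_38 output = x_parse_terraform_version__mutmut_38_alt output := by
  have hfold : ∀ (lines : List String),
      lines.foldl (fun info line =>
        let line := PySem.Str.strip line
        if PySem.Str.startswith line "Terraform v" then
          info.insert "version" (PySem.Str.replace line "Terraform v" "")
        else if PySem.Str.startswith line "on " then
          info.insert "platform" (PySem.Str.strip (PySem.Str.replace line "on " "XXXX"))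
        else info) (PySem.Dict.ofList [("tool", "terraform")])
      = (lines.map PySem.Str.strip).foldl pvStep (pvMkd none none true) := by
    intro lines
    rw [List.foldl_map, pvOfList_eq]
    rfl
  have hA : x_parse_terraform_version__mutmut_38 output
      = (pvMkd (pvSv (pvLines output)) (pvSp (pvLines output)) (pvSf (pvLines output))).items :=
    congrArg PySem.Dict.items
      ((hfold ((PySem.Str.split? output "\n").getD [])).trans (pvMain _))
  have hB : x_parse_terraform_version__mutmut_38_alt output
      = pvAltBuild (pvSv (pvLines output)) (pvSp (pvLines output)) := rfl
  rw [hA, hB]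
  cases hsv : pvSv (pvLines output) with
  | none =>
    rw [← pvAltEq]
    cases pvSp (pvLines output) <;> cases pvSf (pvLines output) <;> simp [pvMkd]
  | some v =>
    rw [pvSf_of_pre output hpre (by rw [hsv]; simp)]
    exact pvAltEq _ _

-- ===== VERDICT (by name: the statement is the Claim_ definition above) =====
theorem x_parse_terraform_version__mutmut_38_spec : Claim_equal_x_parse_terraform_version__mutmut_38 := by
  intro output _ hpre
  exact x_parse_terraform_version__mutmut_38_spec' output hpre
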